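-- pv_equiv track=rewrite | github.com/PanJianTing/LeetCode | 2802_FindTheK-thLuckyNumber.py | kthLuckyNumber
-- ===== SOURCE A (Python) =====
-- def kthLuckyNumber(k: int) -> str:
--     k = k+1
--     res = ''
--
--     while k > 1:
--         if k & 1:
--             res = "7" + res
--         else:
--             res = '4' + res
--         k >>= 1
--     return res
-- ===== SOURCE B (Python) =====
-- def kthLuckyNumber(k: int) -> str:
--     if k <= 0:
--         return ''
--     # phase 1: find the digit length L and the 1-based rank r within the L-digit group
--     r, L = k, 1
--     while r > 2 ** L:
--         r -= 2 ** L
--         L += 1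
--     # phase 2: fixed-width base-2 conversion of the 0-based offset, MSB first
--     off = r - 1
--     s = ''
--     for i in range(L - 1, -1, -1):
--         s += '7' if (off >> i) & 1 else '4'
--     return s
-- ===== Notes on version B (the rewrite author's own statement) =====
-- stated objective: alternative
-- what changed: A strips the bits of the successor of k LSB-first and prepends digits; B first finds the digit length by subtracting group sizes, then emits the offset's bits MSB-first as a fixed-width base-2 conversion.
import Mathlib
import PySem

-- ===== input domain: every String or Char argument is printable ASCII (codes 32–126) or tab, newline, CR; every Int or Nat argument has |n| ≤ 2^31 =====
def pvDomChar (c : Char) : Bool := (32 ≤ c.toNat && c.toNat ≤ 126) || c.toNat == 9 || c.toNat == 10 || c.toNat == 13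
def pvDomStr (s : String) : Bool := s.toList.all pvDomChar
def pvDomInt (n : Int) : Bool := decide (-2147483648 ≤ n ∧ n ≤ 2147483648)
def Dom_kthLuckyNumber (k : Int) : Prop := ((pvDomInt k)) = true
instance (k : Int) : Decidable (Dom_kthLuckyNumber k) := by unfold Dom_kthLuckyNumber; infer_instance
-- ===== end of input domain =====

-- Header: B replaces A's LSB-first bit-stripping-and-prepend with a length-finding
-- phase followed by a fixed-width MSB-first base-2 conversion (alternative decomposition,
-- same asymptotic cost).


-- ===== PORT A =====
-- while k > 1: prepend '7'/'4' according to k & 1; k >>= 1.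
-- (k & 1 = k % 2 and k >> 1 = k // 2; both exact here since the loop body only runs for k > 1.)
def aLoop (k : Int) (res : String) : String :=
  if _h : k > 1 then
    aLoop (PySem.Int.floordiv k 2) ((if k % 2 = 1 then "7" else "4") ++ res)
  else res
  termination_by k.toNat
  decreasing_by
    rw [PySem.Int.floordiv_eq_ediv_of_pos (by omega)]
    omega

def kthLuckyNumber (k : Int) : String := aLoop (k + 1) ""

-- ===== PORT B =====
-- phase 1: while r > 2**L: r -= 2**L; L += 1   (L only ever holds nonnegative values)
def bLoop (r : Int) (L : Nat) : Int × Nat :=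
  if h : r > 2 ^ L then bLoop (r - 2 ^ L) (L + 1) else (r, L)
  termination_by r.toNat
  decreasing_by
    have hp : (0:Int) < 2 ^ L := pow_pos (by norm_num) L
    omega

-- phase 2: for i in range(L-1, -1, -1): s += '7' if (off >> i) & 1 else '4'
-- (off ≥ 0 whenever reached, so off >> i = off / 2^i and & 1 = % 2, both exact.)
def bBuild : Nat → Int → String
  | 0, _ => ""
  | n + 1, off => (if off / 2 ^ n % 2 = 1 then "7" else "4") ++ bBuild n off

def kthLuckyNumber_alt (k : Int) : String :=
  if k ≤ 0 then ""
  else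
    let p := bLoop k 1
    bBuild p.2 (p.1 - 1)

-- ===== PRECONDITION & SPEC =====
def Spec_kthLuckyNumber (k : Int) (out : String) : Prop := out = kthLuckyNumber_alt k
instance (k : Int) (out : String) : Decidable (Spec_kthLuckyNumber k out) := by unfold Spec_kthLuckyNumber; infer_instance

-- ===== CLAIM (what is proved, stated in full; the proofs are below) =====
def Claim_equal_kthLuckyNumber : Prop := ∀ (k : Int), Dom_kthLuckyNumber k → Spec_kthLuckyNumber k (kthLuckyNumber k)

-- ===== LEMMAS AND PROOFS =====

theorem aLoop_append (m : Int) (res : String) : aLoop m res = aLoop m "" ++ res := by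
  by_cases h : m > 1
  · conv_lhs => rw [aLoop, dif_pos h]
    conv_rhs => rw [aLoop, dif_pos h]
    rw [aLoop_append (PySem.Int.floordiv m 2) ((if m % 2 = 1 then "7" else "4") ++ res),
        aLoop_append (PySem.Int.floordiv m 2) ((if m % 2 = 1 then "7" else "4") ++ "")]
    simp [String.append_assoc]
  · rw [aLoop, dif_neg h, aLoop, dif_neg h]
    simp
  termination_by m.toNat
  decreasing_by
    all_goals rw [PySem.Int.floordiv_eq_ediv_of_pos (by omega)]; omega

-- bottom-up recurrence for bBuild (valid for nonnegative off)
theorem bBuild_snoc (n : Nat) (off : Int) (hoff : 0 ≤ off) :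
    bBuild (n + 1) off = bBuild n (off / 2) ++ (if off % 2 = 1 then "7" else "4") := by
  induction n generalizing off with
  | zero => simp [bBuild]
  | succ n ih =>
    have h1 : bBuild (n + 2) off
        = (if off / 2 ^ (n + 1) % 2 = 1 then "7" else "4") ++ bBuild (n + 1) off := rfl
    rw [h1, ih off hoff]
    have h2 : bBuild (n + 1) (off / 2)
        = (if (off / 2) / 2 ^ n % 2 = 1 then "7" else "4") ++ bBuild n (off / 2) := rfl
    rw [h2]
    have h3 : off / 2 ^ (n + 1) = (off / 2) / 2 ^ n := by
      rw [pow_succ, mul_comm, Int.ediv_ediv_of_nonneg (by norm_num)]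
    rw [h3, String.append_assoc]

-- main bridge: for 2^L ≤ m < 2^(L+1), A's loop builds exactly B's fixed-width conversion
theorem aLoop_eq_bBuild (L : Nat) (m : Int) (h1 : 2 ^ L ≤ m) (h2 : m < 2 ^ (L + 1)) :
    aLoop m "" = bBuild L (m - 2 ^ L) := by
  induction L generalizing m with
  | zero =>
    have hm : m = 1 := by norm_num at h1 h2; omega
    subst hm
    rw [aLoop, dif_neg (by norm_num)]
    rfl
  | succ L ih =>
    have hc : (0:Int) < 2 ^ L := pow_pos (by norm_num) L
    have hs : (2:Int) ^ (L + 1) = 2 * 2 ^ L := by ring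
    have hs2 : (2:Int) ^ (L + 2) = 4 * 2 ^ L := by ring
    rw [hs] at h1
    rw [hs2] at h2
    have hm1 : m > 1 := by omega
    rw [aLoop, dif_pos hm1, aLoop_append,
        PySem.Int.floordiv_eq_ediv_of_pos (by omega : (0:Int) < 2)]
    have hb1 : 2 ^ L ≤ m / 2 := by omega
    have hb2 : m / 2 < 2 ^ (L + 1) := by rw [hs]; omega
    rw [ih (m / 2) hb1 hb2]
    have hoff : (0:Int) ≤ m - 2 ^ (L + 1) := by rw [hs]; omega
    rw [bBuild_snoc L _ hoff]
    have he1 : (m - 2 ^ (L + 1)) / 2 = m / 2 - 2 ^ L := by rw [hs]; omega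
    have he2 : (m - 2 ^ (L + 1)) % 2 = m % 2 := by rw [hs]; omega
    rw [he1, he2]
    simp

-- bLoop invariant: r + 2^L is preserved, and on exit 1 ≤ r' ≤ 2^L'
theorem bLoop_spec (r : Int) (L : Nat) (hr : 1 ≤ r) :
    1 ≤ (bLoop r L).1 ∧ (bLoop r L).1 ≤ 2 ^ (bLoop r L).2 ∧
      (bLoop r L).1 + 2 ^ (bLoop r L).2 = r + 2 ^ L := by
  fun_induction bLoop r L with
  | case1 r L h ih =>
    have hc : (0:Int) < 2 ^ L := pow_pos (by norm_num) L
    have := ih (by omega)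
    have hps : (2:Int) ^ (L + 1) = 2 * 2 ^ L := by ring
    refine ⟨this.1, this.2.1, ?_⟩
    rw [this.2.2, hps]; ring
  | case2 r L h =>
    refine ⟨hr, ?_, rfl⟩
    simpa using h

-- ===== VERDICT (by name: the statement is the Claim_ definition above) =====
theorem kthLuckyNumber_spec : Claim_equal_kthLuckyNumber := by
  intro k _
  unfold Spec_kthLuckyNumber kthLuckyNumber kthLuckyNumber_alt
  by_cases hk : k ≤ 0
  · rw [if_pos hk, aLoop, dif_neg (by omega)]
  · rw [if_neg hk]
    obtain ⟨h1, h2, h3⟩ := bLoop_spec k 1 (by omega)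
    have hc : (0:Int) < 2 ^ (bLoop k 1).2 := pow_pos (by norm_num) _
    have hs : (2:Int) ^ ((bLoop k 1).2 + 1) = 2 * 2 ^ (bLoop k 1).2 := by ring
    have hb1 : 2 ^ (bLoop k 1).2 ≤ k + 1 := by norm_num at h3; omega
    have hb2 : k + 1 < 2 ^ ((bLoop k 1).2 + 1) := by rw [hs]; norm_num at h3; omega
    rw [aLoop_eq_bBuild (bLoop k 1).2 (k + 1) hb1 hb2]
    have : k + 1 - 2 ^ (bLoop k 1).2 = (bLoop k 1).1 - 1 := by norm_num at h3; omega
    rw [this]
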